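-- pv_equiv track=rewrite | github.com/phanductaivt/2B-Agents | system/tools/review/confirmation_manager.py | _find_primary_blocked_requirement
-- ===== SOURCE A (Python) =====
-- def _find_primary_blocked_requirement(requirements: dict[str, str]) -> str:
--     for name, status in requirements.items():
--         if status.strip().lower() == "blocked":
--             return name
--     for name, status in requirements.items():
--         if status.strip().lower() in {"in progress", "done"}:
--             return name
--     return ""
-- ===== SOURCE B (Python) =====
-- def _find_primary_blocked_requirement(requirements: dict[str, str]) -> str:
--     fallback = None
--     for name, status in requirements.items():
--         s = status.strip().lower()
--         if s == "blocked":
--             return name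
--         if fallback is None and s in {"in progress", "done"}:
--             fallback = name
--     return fallback if fallback is not None else ""
-- ===== Notes on version B (the rewrite author's own statement) =====
-- stated objective: simpler
-- what changed: Replaced A's two separate scans of the dict with a single pass that returns on the first 'blocked' status and keeps the first 'in progress'/'done' name in a fallback accumulator.
import Mathlib
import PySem

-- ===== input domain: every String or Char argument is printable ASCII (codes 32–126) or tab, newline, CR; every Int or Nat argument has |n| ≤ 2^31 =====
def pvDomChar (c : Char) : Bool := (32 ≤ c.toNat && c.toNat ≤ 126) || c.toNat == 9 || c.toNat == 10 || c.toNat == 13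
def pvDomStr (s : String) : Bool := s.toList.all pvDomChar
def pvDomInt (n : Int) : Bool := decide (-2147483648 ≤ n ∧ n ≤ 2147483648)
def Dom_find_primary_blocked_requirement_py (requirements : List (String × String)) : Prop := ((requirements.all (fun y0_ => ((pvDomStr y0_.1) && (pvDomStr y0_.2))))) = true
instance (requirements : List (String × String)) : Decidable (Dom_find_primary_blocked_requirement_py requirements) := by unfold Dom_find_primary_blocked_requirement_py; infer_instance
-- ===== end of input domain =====

-- B replaces A's two scans over the requirements with a single pass carrying a fallback accumulator (simpler).


-- ===== PORT A =====
-- first scan: first name whose status strips/lowers to "blocked"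
def pvScanBlocked : List (String × String) → Option String
  | [] => none
  | (name, status) :: rest =>
    if PySem.Str.lower (PySem.Str.strip status) = "blocked" then some name
    else pvScanBlocked rest

-- second scan: first name whose status strips/lowers to "in progress" or "done"
def pvScanProgress : List (String × String) → Option String
  | [] => none
  | (name, status) :: rest =>
    let s := PySem.Str.lower (PySem.Str.strip status)
    if s = "in progress" ∨ s = "done" then some name
    else pvScanProgress rest

def find_primary_blocked_requirement_py (requirements : List (String × String)) : String :=
  match pvScanBlocked requirements with
  | some name => name
  | none =>
    match pvScanProgress requirements with
    | some name => name
    | none => ""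

-- ===== PORT B =====
-- one pass carrying the first in-progress/done name as a fallback
def pvAltLoop : List (String × String) → Option String → String
  | [], fallback => match fallback with | some f => f | none => ""
  | (name, status) :: rest, fallback =>
    let s := PySem.Str.lower (PySem.Str.strip status)
    if s = "blocked" then name
    else if fallback = none ∧ (s = "in progress" ∨ s = "done") then pvAltLoop rest (some name)
    else pvAltLoop rest fallback

def find_primary_blocked_requirement_py_alt (requirements : List (String × String)) : String :=
  pvAltLoop requirements none

-- ===== PRECONDITION & SPEC =====
def Spec_find_primary_blocked_requirement_py (requirements : List (String × String)) (out : String) : Prop := out = find_primary_blocked_requirement_py_alt requirements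
instance (requirements : List (String × String)) (out : String) : Decidable (Spec_find_primary_blocked_requirement_py requirements out) := by unfold Spec_find_primary_blocked_requirement_py; infer_instance

-- ===== CLAIM (what is proved, stated in full; the proofs are below) =====
def Claim_equal_find_primary_blocked_requirement_py : Prop := ∀ (requirements : List (String × String)), Dom_find_primary_blocked_requirement_py requirements → Spec_find_primary_blocked_requirement_py requirements (find_primary_blocked_requirement_py requirements)

-- ===== LEMMAS AND PROOFS =====

theorem pvAltLoop_some (l : List (String × String)) (f : String) :
    pvAltLoop l (some f) = (pvScanBlocked l).getD f := by
  induction l with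
  | nil => rfl
  | cons p rest ih =>
    obtain ⟨name, status⟩ := p
    simp only [pvAltLoop, pvScanBlocked]
    split_ifs with h1 h2
    · rfl
    · simp at h2
    · exact ih

theorem pvAltLoop_none (l : List (String × String)) :
    pvAltLoop l none = find_primary_blocked_requirement_py l := by
  induction l with
  | nil => rfl
  | cons p rest ih =>
    obtain ⟨name, status⟩ := p
    by_cases h1 : PySem.Str.lower (PySem.Str.strip status) = "blocked"
    · simp [pvAltLoop, find_primary_blocked_requirement_py, pvScanBlocked, h1]
    · by_cases h2 : PySem.Str.lower (PySem.Str.strip status) = "in progress" ∨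
          PySem.Str.lower (PySem.Str.strip status) = "done"
      · simp only [pvAltLoop, find_primary_blocked_requirement_py, pvScanBlocked, pvScanProgress,
          h1, h2, if_false, if_true, true_and, if_neg, if_pos]
        rw [pvAltLoop_some]
        cases h : pvScanBlocked rest <;> simp [h]
      · simp only [pvAltLoop, find_primary_blocked_requirement_py, pvScanBlocked, pvScanProgress]
        rw [if_neg h1, if_neg h1, if_neg (by simp [h2]), if_neg h2, ih]
        rfl

-- ===== VERDICT (by name: the statement is the Claim_ definition above) =====
theorem find_primary_blocked_requirement_py_spec : Claim_equal_find_primary_blocked_requirement_py := by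
  intro requirements _
  unfold Spec_find_primary_blocked_requirement_py find_primary_blocked_requirement_py_alt
  exact (pvAltLoop_none requirements).symm
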